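-- pv_equiv track=rewrite | github.com/thijsnulle/msc-experiment | plots/results/visualisations-2.py | get_excess_tokens_for_line_level
-- ===== SOURCE A (Python) =====
-- import itertools
--
-- def get_excess_tokens_for_line_level(tokens):
--     if '#' not in tokens:
--         return 0
--
--     excess_tokens = 0
--
--     # Excess print-statement tokens
--     print_indexes = [i for i, t in enumerate(tokens) if t == 'print']
--
--     for i in print_indexes:
--         preceding_whitespace_tokens = list(itertools.takewhile(
--             lambda x: all(y == ' ' for y in x),
--             reversed(tokens[:i]),
--         ))
--
--         succeeding_print_tokens = list(itertools.takewhile(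
--             lambda x: x != '\n',
--             tokens[i:],
--         ))
--
--         excess_tokens += len(preceding_whitespace_tokens)
--         excess_tokens += len(succeeding_print_tokens)
--
--
--     # Excess comment tokens
--     comments_indexes = [i for i, t in enumerate(tokens) if t == '#']
--
--     for i in comments_indexes:
--         preceding_whitespace_tokens = list(itertools.takewhile(
--             lambda x: all(y == ' ' for y in x),
--             reversed(tokens[:i]),
--         ))
--
--         succeeding_comment_tokens = list(itertools.takewhile(
--             lambda x: x != '\n',
--             tokens[i:],
--         ))
--
--         excess_tokens += len(preceding_whitespace_tokens)
--         excess_tokens += len(succeeding_comment_tokens)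
--
--     return excess_tokens
-- ===== SOURCE B (Python) =====
-- def get_excess_tokens_for_line_level(tokens):
--     if '#' not in tokens:
--         return 0
--
--     n = len(tokens)
--
--     # ws[i] = length of the run of all-space tokens immediately preceding index i
--     ws = [0] * (n + 1)
--     for i, t in enumerate(tokens):
--         ws[i + 1] = ws[i] + 1 if all(c == ' ' for c in t) else 0
--
--     # nl[i] = number of tokens from index i up to (not including) the next '\n'
--     nl = [0] * (n + 1)
--     for i in range(n - 1, -1, -1):
--         nl[i] = 0 if tokens[i] == '\n' else nl[i + 1] + 1
--
--     return sum(ws[i] + nl[i] for i, t in enumerate(tokens) if t in ('print', '#'))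
-- ===== Notes on version B (the rewrite author's own statement) =====
-- stated objective: alternative
-- what changed: Replaces the per-occurrence takewhile rescans around each print/# token with two precomputed one-pass tables (preceding all-space run lengths, distance to next newline) that are then summed at print/# indices.
import Mathlib
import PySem

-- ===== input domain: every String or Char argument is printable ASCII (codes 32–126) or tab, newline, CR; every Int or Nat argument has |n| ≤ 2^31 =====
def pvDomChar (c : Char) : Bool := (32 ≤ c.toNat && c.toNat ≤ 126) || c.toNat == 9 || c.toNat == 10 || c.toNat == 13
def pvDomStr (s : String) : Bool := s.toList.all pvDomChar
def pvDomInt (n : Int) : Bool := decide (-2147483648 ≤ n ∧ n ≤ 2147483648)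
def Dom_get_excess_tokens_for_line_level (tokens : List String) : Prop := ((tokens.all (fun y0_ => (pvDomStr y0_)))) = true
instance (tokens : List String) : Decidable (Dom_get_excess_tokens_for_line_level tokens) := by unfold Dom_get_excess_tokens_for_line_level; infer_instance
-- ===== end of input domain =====

-- B replaces A's per-occurrence takewhile rescans around each print/# token with two
-- precomputed one-pass tables (preceding all-space run length, distance to next newline token).

-- all(y == ' ' for y in x)
def pvIsSpaceTok (x : String) : Bool := x.toList.all (fun y => y == ' ')

-- ===== PORT A =====
def get_excess_tokens_for_line_level (tokens : List String) : Int :=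
  if !(tokens.contains "#") then 0 else
    let print_indexes := (tokens.zipIdx.filter (fun p => p.1 == "print")).map (·.2)
    let excess1 := print_indexes.foldl (fun acc i =>
        acc + (((tokens.take i).reverse.takeWhile pvIsSpaceTok).length : Int)
            + (((tokens.drop i).takeWhile (fun x => x != "\n")).length : Int)) 0
    let comments_indexes := (tokens.zipIdx.filter (fun p => p.1 == "#")).map (·.2)
    comments_indexes.foldl (fun acc i =>
        acc + (((tokens.take i).reverse.takeWhile pvIsSpaceTok).length : Int)
            + (((tokens.drop i).takeWhile (fun x => x != "\n")).length : Int)) excess1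

-- ===== PORT B =====
def get_excess_tokens_for_line_level_alt (tokens : List String) : Int :=
  if !(tokens.contains "#") then 0 else
    -- forward pass: ws[i] = length of the all-space run just before index i
    let ws := tokens.scanl (fun w t => if pvIsSpaceTok t then w + 1 else 0) 0
    -- backward pass: nl[i] = tokens from i up to (not incl.) the next '\n'
    let nl := tokens.foldr (fun t acc => (if t == "\n" then 0 else acc.headD 0 + 1) :: acc) [0]
    tokens.zipIdx.foldl (fun acc p =>
        if p.1 == "print" || p.1 == "#" then
          acc + (ws.getD p.2 0 : Int) + (nl.getD p.2 0 : Int)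
        else acc) 0

-- ===== PRECONDITION & SPEC =====
def Spec_get_excess_tokens_for_line_level (tokens : List String) (out : Int) : Prop := out = get_excess_tokens_for_line_level_alt tokens
instance (tokens : List String) (out : Int) : Decidable (Spec_get_excess_tokens_for_line_level tokens out) := by unfold Spec_get_excess_tokens_for_line_level; infer_instance

-- ===== CLAIM (what is proved, stated in full; the proofs are below) =====
def Claim_equal_get_excess_tokens_for_line_level : Prop := ∀ (tokens : List String), Dom_get_excess_tokens_for_line_level tokens → Spec_get_excess_tokens_for_line_level tokens (get_excess_tokens_for_line_level tokens)

-- ===== LEMMAS AND PROOFS =====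

-- A's per-index quantities
def pvPrec (tokens : List String) (i : Nat) : Nat :=
  ((tokens.take i).reverse.takeWhile pvIsSpaceTok).length
def pvSucc (tokens : List String) (i : Nat) : Nat :=
  ((tokens.drop i).takeWhile (fun x => x != "\n")).length

-- trailing all-space run length as a left fold
theorem pv_run_foldl (p : String → Bool) (l : List String) :
    ((l.reverse.takeWhile p).length : Int) = l.foldl (fun w t => if p t then w + 1 else 0) (0 : Int) := by
  induction l using List.reverseRecOn with
  | nil => simp
  | append_singleton l' t ih =>
      simp only [List.reverse_append, List.reverse_singleton, List.singleton_append,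
        List.takeWhile, List.foldl_append, List.foldl_cons, List.foldl_nil]
      cases h : p t <;> simp [h, ← ih]

-- scanl indexing
theorem pv_scanl_getD {α β : Type} (f : β → α → β) (b : β) (l : List α) (i : Nat) (d : β)
    (h : i ≤ l.length) : (l.scanl f b).getD i d = (l.take i).foldl f b := by
  induction l generalizing b i with
  | nil =>
      have : i = 0 := Nat.le_zero.mp (by simpa using h)
      subst this; simp [List.scanl]
  | cons t ts ih =>
      cases i with
      | zero => simp [List.scanl]
      | succ i => simpa [List.scanl] using ih (f b t) i (by simpa using h)

theorem pv_ws_getD (tokens : List String) (i : Nat) (h : i ≤ tokens.length) :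
    (tokens.scanl (fun w t => if pvIsSpaceTok t then w + 1 else 0) (0 : Int)).getD i 0
      = (pvPrec tokens i : Int) := by
  rw [pv_scanl_getD _ _ _ _ _ h, pvPrec, ← pv_run_foldl]

def pvNlList (tokens : List String) : List Int :=
  tokens.foldr (fun t acc => (if t == "\n" then 0 else acc.headD 0 + 1) :: acc) [0]

theorem pv_nl_getD (tokens : List String) (i : Nat) (h : i ≤ tokens.length) :
    (pvNlList tokens).getD i 0 = (pvSucc tokens i : Int) := by
  induction tokens generalizing i with
  | nil =>
      have : i = 0 := Nat.le_zero.mp (by simpa using h)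
      subst this; simp [pvNlList, pvSucc]
  | cons t ts ih =>
      have h0 : (pvNlList ts).headD 0 = (pvSucc ts 0 : Int) := by
        have := ih 0 (Nat.zero_le _)
        simpa [List.getD, List.headD_eq_head?, List.head?_eq_getElem?] using this
      cases i with
      | zero =>
          simp only [pvNlList, List.foldr, List.getD, List.getElem?_cons_zero, Option.getD_some]
          cases ht : (t == "\n") with
          | true => simp [pvSucc, List.takeWhile, eq_of_beq ht]
          | false =>
              rw [← pvNlList] at *
              have htt : (t != "\n") = true := by
                simp only [bne_iff_ne, ne_eq]; intro he; rw [he] at ht; simp at ht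
              simp only [pvSucc, List.drop, List.takeWhile, htt, List.length_cons]
              rw [h0, pvSucc]
              push_cast
              simp
      | succ i =>
          have := ih i (by simpa using h)
          simpa [pvNlList, pvSucc, List.getD] using this

-- fold with a two-term additive body is a sum
theorem pv_foldl_add2 (g1 g2 : Nat → Int) (l : List Nat) (c : Int) :
    l.foldl (fun acc i => acc + g1 i + g2 i) c = c + (l.map (fun i => g1 i + g2 i)).sum := by
  induction l generalizing c with
  | nil => simp
  | cons x xs ih => simp [ih]; ring

-- conditional fold over pairs is a sum over the filter
theorem pv_foldl_if_add2 (c : String × Nat → Bool) (g1 g2 : String × Nat → Int)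
    (l : List (String × Nat)) (a : Int) :
    l.foldl (fun acc p => if c p then acc + g1 p + g2 p else acc) a
      = a + ((l.filter c).map (fun p => g1 p + g2 p)).sum := by
  induction l generalizing a with
  | nil => simp
  | cons x xs ih =>
      by_cases h : c x = true <;> simp [h, ih] <;> ring

-- splitting a disjoint disjunctive filter sum
theorem pv_filter_or_sum (p q : String × Nat → Bool) (g : String × Nat → Int)
    (l : List (String × Nat)) (hd : ∀ x, ¬(p x = true ∧ q x = true)) :
    ((l.filter (fun x => p x || q x)).map g).sum
      = ((l.filter p).map g).sum + ((l.filter q).map g).sum := by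
  induction l with
  | nil => simp
  | cons x xs ih =>
      cases hp : p x with
      | true =>
          have hq : q x = false := by
            cases hqq : q x with
            | true => exact absurd ⟨hp, hqq⟩ (hd x)
            | false => rfl
          simp [List.filter, hp, hq, ih]; ring
      | false =>
          cases hq : q x with
          | true => simp [List.filter, hp, hq, ih]; ring
          | false => simp [List.filter, hp, hq, ih]

theorem pv_mem_zipIdx_lt {l : List String} {p : String × Nat} (h : p ∈ l.zipIdx) :
    p.2 < l.length := by
  obtain ⟨x, i⟩ := p
  have := (List.mem_zipIdx h).2.1
  simpa using this

-- ===== VERDICT (by name: the statement is the Claim_ definition above) =====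
theorem get_excess_tokens_for_line_level_spec : Claim_equal_get_excess_tokens_for_line_level := by
  intro tokens _
  show get_excess_tokens_for_line_level tokens = get_excess_tokens_for_line_level_alt tokens
  unfold get_excess_tokens_for_line_level get_excess_tokens_for_line_level_alt
  cases hc : tokens.contains "#" with
  | false => simp [hc]
  | true =>
    simp only [hc, Bool.not_true, Bool.false_eq_true, if_false]
    rw [pv_foldl_if_add2, pv_foldl_add2, pv_foldl_add2]
    rw [pv_filter_or_sum (fun p => p.1 == "print") (fun p => p.1 == "#") _ _
      (by rintro ⟨x, i⟩ ⟨h1, h2⟩; simp at h1 h2; rw [h1] at h2; exact absurd h2 (by decide))]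
    have hmap : ∀ (c : String × Nat → Bool),
        (((tokens.zipIdx.filter c).map (·.2)).map
            (fun i => ((pvPrec tokens i : Int)) + (pvSucc tokens i : Int))).sum
          = ((tokens.zipIdx.filter c).map (fun p =>
              (tokens.scanl (fun w t => if pvIsSpaceTok t then w + 1 else 0) (0 : Int)).getD p.2 0
              + (pvNlList tokens).getD p.2 0)).sum := by
      intro c
      rw [List.map_map]
      refine congrArg _ (List.map_congr_left ?_)
      intro p hp
      have hlt : p.2 < tokens.length := pv_mem_zipIdx_lt (List.mem_of_mem_filter hp)
      simp only [Function.comp]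
      rw [pv_ws_getD tokens p.2 hlt.le, pv_nl_getD tokens p.2 hlt.le]
    have h1 := hmap (fun p => p.1 == "print")
    have h2 := hmap (fun p => p.1 == "#")
    simp only [pvPrec, pvSucc, pvNlList] at h1 h2
    rw [← h1, ← h2]
    ring
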